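-- pv_equiv track=rewrite | github.com/zhengan-chen/Young_tableaux | young.py | ifsmooth
-- ===== SOURCE A (Python) =====
-- import itertools
--
-- def extract_subpermutations(perm, length=4):
--     """
--     Extract all subsequences of length 4 where the indices satisfy i < j < k < l.
--     """
--     subperms = []
--     for indices in itertools.combinations(range(len(perm)), length):
--         subperm = [perm[i] for i in indices]
--         subperms.append(subperm)
--     return subperms
--
-- def ifsmooth(perm):
--     """
--     Check if a permutation is smooth.
--     """
--     subpermutations = extract_subpermutations(perm)
--     for subperm in subpermutations:
--         assert len(subperm) == 4, "Sub-permutations must have length 4"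
--         if subperm[1]>subperm[0] and subperm[0]>subperm[3] and subperm[3]>subperm[2]:
--             return False
--         if subperm[0]>subperm[2] and subperm[2]>subperm[1] and subperm[1]>subperm[3]:
--             return False
--     return True
-- ===== SOURCE B (Python) =====
-- def _mx(vals):
--     best = None
--     for v in vals:
--         if best is None or v > best:
--             best = v
--     return best
--
-- def _mn(vals):
--     best = None
--     for v in vals:
--         if best is None or v < best:
--             best = v
--     return best
--
-- def ifsmooth(perm):
--     n = len(perm)
--     # P[j]: largest value strictly left of j that is strictly smaller than perm[j]
--     P = [_mx([perm[i] for i in range(j) if perm[i] < perm[j]]) for j in range(n)]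
--     # B2[x]: best P-value among positions strictly left of x
--     B2 = [_mx([p for p in P[:x] if p is not None]) for x in range(n)]
--     # pref[x]: max of perm[:x];  suf[y]: min of perm[y+1:]
--     pref = [_mx(perm[:x]) for x in range(n)]
--     suf = [_mn(perm[y + 1:]) for y in range(n)]
--     for x in range(n):
--         for y in range(x + 1, n):
--             # 3412 with (x, y) = (k, l): some i<j<x with perm[i]<perm[j] and perm[i]>perm[y]
--             if perm[x] < perm[y] and B2[x] is not None and B2[x] > perm[y]:
--                 return False
--             # 4231 with (x, y) = (j, k): some i<x with perm[i]>perm[y], some l>y with perm[l]<perm[x]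
--             if perm[x] < perm[y] and pref[x] is not None and pref[x] > perm[y] and suf[y] is not None and suf[y] < perm[x]:
--                 return False
--     return True
-- ===== Notes on version B (the rewrite author's own statement) =====
-- stated objective: faster
-- what changed: Instead of scanning all C(n,4) index quadruples, B precomputes per-index tables (largest smaller value to the left, its prefix maximum, prefix max, suffix min) and detects a 3412 or 4231 pattern with a single O(n^2) scan over index pairs.
import Mathlib
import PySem

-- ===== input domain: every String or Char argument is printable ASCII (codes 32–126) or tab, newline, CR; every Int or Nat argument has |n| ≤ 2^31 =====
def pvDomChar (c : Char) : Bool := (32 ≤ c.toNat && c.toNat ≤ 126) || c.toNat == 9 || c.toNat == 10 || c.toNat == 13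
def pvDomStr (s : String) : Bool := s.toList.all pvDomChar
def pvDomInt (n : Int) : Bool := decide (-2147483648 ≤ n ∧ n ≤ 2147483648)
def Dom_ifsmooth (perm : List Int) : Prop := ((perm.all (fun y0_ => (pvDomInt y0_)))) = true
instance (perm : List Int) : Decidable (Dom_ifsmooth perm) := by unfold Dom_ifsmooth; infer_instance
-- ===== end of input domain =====

-- B replaces A's scan of all C(n,4) index quadruples by an O(n^2) pair scan over
-- precomputed prefix/suffix extremum tables (objective: faster).

-- ===== PORT A =====
-- perm[i]: every index below comes from range(len(perm)), so it is in range and getD is exact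
def pvAt (perm : List Int) (i : Nat) : Int := perm.getD i 0

-- itertools.combinations(range(len(perm)), 4) mapped to the value lists [perm[i] for i in indices]:
-- all quadruples i<j<k<l of indices, as four nested enumerations
def extract_subpermutations (perm : List Int) : List (List Int) :=
  (List.range perm.length).flatMap fun i =>
    ((List.range perm.length).filter (fun j => decide (i < j))).flatMap fun j =>
      ((List.range perm.length).filter (fun k => decide (j < k))).flatMap fun k =>
        ((List.range perm.length).filter (fun l => decide (k < l))).map fun l =>
          [pvAt perm i, pvAt perm j, pvAt perm k, pvAt perm l]

-- A's for-loop over the subpermutations with its two early 'return False' exits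
-- (the assert always holds: every subperm has length 4)
def ifsmoothLoop : List (List Int) → Bool
  | [] => true
  | s :: rest =>
    if s.getD 1 0 > s.getD 0 0 ∧ s.getD 0 0 > s.getD 3 0 ∧ s.getD 3 0 > s.getD 2 0 then false
    else if s.getD 0 0 > s.getD 2 0 ∧ s.getD 2 0 > s.getD 1 0 ∧ s.getD 1 0 > s.getD 3 0 then false
    else ifsmoothLoop rest

def ifsmooth (perm : List Int) : Bool := ifsmoothLoop (extract_subpermutations perm)

-- ===== PORT B =====
-- _mx / _mn of Source B: running max/min with a None start
def pvMx (vals : List Int) : Option Int :=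
  vals.foldl (fun best v => match best with
    | none => some v
    | some b => if v > b then some v else some b) none

def pvMn (vals : List Int) : Option Int :=
  vals.foldl (fun best v => match best with
    | none => some v
    | some b => if v < b then some v else some b) none

-- P[j]: largest value strictly left of j that is strictly smaller than perm[j]
def pvP (perm : List Int) : List (Option Int) :=
  (List.range perm.length).map fun j =>
    pvMx (((List.range j).filter (fun i => decide (pvAt perm i < pvAt perm j))).map (pvAt perm))

-- B2[x]: best P-value among positions strictly left of x
def pvB2 (perm : List Int) : List (Option Int) :=
  (List.range perm.length).map fun x => pvMx (((pvP perm).take x).filterMap id)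

-- pref[x]: max of perm[:x];  suf[y]: min of perm[y+1:]
def pvPref (perm : List Int) : List (Option Int) :=
  (List.range perm.length).map fun x => pvMx (perm.take x)

def pvSuf (perm : List Int) : List (Option Int) :=
  (List.range perm.length).map fun y => pvMn (perm.drop (y + 1))

-- the double loop over pairs x<y with early 'return False' ≡ negated any;
-- 'T[x] is not None and T[x] ⋚ perm[y]' is Option.any on the table entry
def ifsmooth_alt (perm : List Int) : Bool :=
  let n := perm.length
  !((List.range n).any fun x =>
    ((List.range n).filter (fun y => decide (x < y))).any fun y =>
      (decide (pvAt perm x < pvAt perm y) &&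
        (((pvB2 perm).getD x none).any fun b => decide (b > pvAt perm y)))
      ||
      (decide (pvAt perm x < pvAt perm y) &&
        (((pvPref perm).getD x none).any fun b => decide (b > pvAt perm y)) &&
        (((pvSuf perm).getD y none).any fun m => decide (m < pvAt perm x))))

-- ===== PRECONDITION & SPEC =====
def Spec_ifsmooth (perm : List Int) (out : Bool) : Prop := out = ifsmooth_alt perm
instance (perm : List Int) (out : Bool) : Decidable (Spec_ifsmooth perm out) := by unfold Spec_ifsmooth; infer_instance

-- ===== CLAIM (what is proved, stated in full; the proofs are below) =====
def Claim_equal_ifsmooth : Prop := ∀ (perm : List Int), Dom_ifsmooth perm → Spec_ifsmooth perm (ifsmooth perm)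

-- ===== LEMMAS AND PROOFS =====

-- both programs return False exactly when some i<j<k<l carries pattern 3412 or 4231
def pvBad (perm : List Int) : Prop :=
  ∃ i j k l, i < j ∧ j < k ∧ k < l ∧ l < perm.length ∧
    ((pvAt perm i < pvAt perm j ∧ pvAt perm l < pvAt perm i ∧ pvAt perm k < pvAt perm l) ∨
     (pvAt perm k < pvAt perm i ∧ pvAt perm j < pvAt perm k ∧ pvAt perm l < pvAt perm j))

-- ---- A side ----

theorem ifsmoothLoop_iff (subs : List (List Int)) : ifsmoothLoop subs = true ↔
    ∀ s ∈ subs, ¬(s.getD 1 0 > s.getD 0 0 ∧ s.getD 0 0 > s.getD 3 0 ∧ s.getD 3 0 > s.getD 2 0) ∧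
                ¬(s.getD 0 0 > s.getD 2 0 ∧ s.getD 2 0 > s.getD 1 0 ∧ s.getD 1 0 > s.getD 3 0) := by
  induction subs with
  | nil => simp [ifsmoothLoop]
  | cons s rest ih =>
    simp only [ifsmoothLoop, List.mem_cons]
    split_ifs with h1 h2 <;> simp_all

theorem mem_extract (perm : List Int) (s : List Int) :
    s ∈ extract_subpermutations perm ↔
      ∃ i j k l, i < j ∧ j < k ∧ k < l ∧ l < perm.length ∧
        s = [pvAt perm i, pvAt perm j, pvAt perm k, pvAt perm l] := by
  simp only [extract_subpermutations, List.mem_flatMap, List.mem_map, List.mem_filter,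
    List.mem_range, decide_eq_true_eq]
  constructor
  · rintro ⟨i, hi, j, ⟨hj, hij⟩, k, ⟨hk, hjk⟩, l, ⟨hl, hkl⟩, hs⟩
    exact ⟨i, j, k, l, hij, hjk, hkl, hl, hs.symm⟩
  · rintro ⟨i, j, k, l, hij, hjk, hkl, hl, hs⟩
    exact ⟨i, by omega, j, ⟨by omega, hij⟩, k, ⟨by omega, hjk⟩, l, ⟨hl, hkl⟩, hs.symm⟩

theorem ifsmooth_true_iff (perm : List Int) : ifsmooth perm = true ↔ ¬ pvBad perm := by
  rw [ifsmooth, ifsmoothLoop_iff]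
  constructor
  · rintro h ⟨i, j, k, l, hij, hjk, hkl, hl, hpat⟩
    have hm := h _ ((mem_extract perm _).2 ⟨i, j, k, l, hij, hjk, hkl, hl, rfl⟩)
    simp only [List.getD] at hm
    rcases hpat with ⟨h1, h2, h3⟩ | ⟨h1, h2, h3⟩
    · exact hm.1 (by simp; omega)
    · exact hm.2 (by simp; omega)
  · intro h s hs
    obtain ⟨i, j, k, l, hij, hjk, hkl, hl, rfl⟩ := (mem_extract perm s).1 hs
    constructor <;> intro hp <;> simp only [List.getD] at hp <;> simp at hp
    · exact h ⟨i, j, k, l, hij, hjk, hkl, hl, Or.inl ⟨hp.1, by omega, by omega⟩⟩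
    · exact h ⟨i, j, k, l, hij, hjk, hkl, hl, Or.inr ⟨hp.1, by omega, by omega⟩⟩

-- ---- B side ----

theorem pvMx_go (rest : List Int) (b : Int) :
    rest.foldl (fun best v => match best with
      | none => some v
      | some b => if v > b then some v else some b) (some b) = some (rest.foldl max b) := by
  induction rest generalizing b with
  | nil => rfl
  | cons v rest ih =>
    simp only [List.foldl_cons]
    rw [show (if v > b then some v else some b : Option Int) = some (max b v) by
      split_ifs with h <;> exact congrArg some (by omega)]
    exact ih (max b v)

theorem pvMx_eq_max? (vals : List Int) : pvMx vals = vals.max? := by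
  cases vals with
  | nil => rfl
  | cons v rest => rw [pvMx, List.foldl_cons, pvMx_go]; rfl

theorem pvMn_go (rest : List Int) (b : Int) :
    rest.foldl (fun best v => match best with
      | none => some v
      | some b => if v < b then some v else some b) (some b) = some (rest.foldl min b) := by
  induction rest generalizing b with
  | nil => rfl
  | cons v rest ih =>
    simp only [List.foldl_cons]
    rw [show (if v < b then some v else some b : Option Int) = some (min b v) by
      split_ifs with h <;> exact congrArg some (by omega)]
    exact ih (min b v)

theorem pvMn_eq_min? (vals : List Int) : pvMn vals = vals.min? := by
  cases vals with
  | nil => rfl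
  | cons v rest => rw [pvMn, List.foldl_cons, pvMn_go]; rfl

theorem pvMx_gt (vals : List Int) (t : Int) :
    (∃ b, pvMx vals = some b ∧ t < b) ↔ ∃ v ∈ vals, t < v := by
  rw [pvMx_eq_max?]
  constructor
  · rintro ⟨b, hb, ht⟩
    exact ⟨b, (List.max?_eq_some_iff.1 hb).1, ht⟩
  · rintro ⟨v, hv, ht⟩
    cases hm : vals.max? with
    | none => rw [List.max?_eq_none_iff] at hm; subst hm; cases hv
    | some m =>
      obtain ⟨-, hle⟩ := List.max?_eq_some_iff.1 hm
      exact ⟨m, rfl, lt_of_lt_of_le ht (hle v hv)⟩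

theorem pvMn_lt (vals : List Int) (t : Int) :
    (∃ m, pvMn vals = some m ∧ m < t) ↔ ∃ v ∈ vals, v < t := by
  rw [pvMn_eq_min?]
  constructor
  · rintro ⟨b, hb, ht⟩
    exact ⟨b, (List.min?_eq_some_iff.1 hb).1, ht⟩
  · rintro ⟨v, hv, ht⟩
    cases hm : vals.min? with
    | none => rw [List.min?_eq_none_iff] at hm; subst hm; cases hv
    | some m =>
      obtain ⟨-, hle⟩ := List.min?_eq_some_iff.1 hm
      exact ⟨m, rfl, lt_of_le_of_lt (hle v hv) ht⟩

theorem optAnyGt_iff (o : Option Int) (t : Int) :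
    (o.any fun b => decide (b > t)) = true ↔ ∃ b, o = some b ∧ t < b := by
  cases o <;> simp

theorem optAnyLt_iff (o : Option Int) (t : Int) :
    (o.any fun m => decide (m < t)) = true ↔ ∃ m, o = some m ∧ m < t := by
  cases o <;> simp

theorem pvAt_eq_getElem (perm : List Int) (i : Nat) (h : i < perm.length) : pvAt perm i = perm[i] :=
  List.getD_eq_getElem perm 0 h

theorem mem_take_iff (perm : List Int) (x : Nat) (v : Int) :
    v ∈ perm.take x ↔ ∃ i, i < x ∧ i < perm.length ∧ pvAt perm i = v := by
  rw [List.mem_take_iff_getElem]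
  constructor
  · rintro ⟨i, h, rfl⟩
    exact ⟨i, by omega, by omega, pvAt_eq_getElem _ _ (by omega)⟩
  · rintro ⟨i, h1, h2, rfl⟩
    exact ⟨i, by omega, (pvAt_eq_getElem _ _ h2).symm⟩

theorem mem_drop_iff (perm : List Int) (y : Nat) (v : Int) :
    v ∈ perm.drop (y + 1) ↔ ∃ l, y < l ∧ l < perm.length ∧ pvAt perm l = v := by
  rw [List.mem_iff_getElem]
  constructor
  · rintro ⟨i, h, rfl⟩
    rw [List.getElem_drop]
    have hl : y + 1 + i < perm.length := by simp [List.length_drop] at h; omega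
    exact ⟨y + 1 + i, by omega, hl, pvAt_eq_getElem _ _ hl⟩
  · rintro ⟨l, h1, h2, rfl⟩
    refine ⟨l - (y + 1), by simp [List.length_drop]; omega, ?_⟩
    rw [List.getElem_drop, ← pvAt_eq_getElem _ _ (by omega)]
    congr 1; omega

theorem pvP_gt (perm : List Int) (j : Nat) (hj : j < perm.length) (t : Int) :
    (∃ b, (pvP perm).getD j none = some b ∧ t < b) ↔
      ∃ i, i < j ∧ pvAt perm i < pvAt perm j ∧ t < pvAt perm i := by
  rw [pvP, PySem.List.getD_map_range _ _ _ _ hj, pvMx_gt]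
  simp only [List.mem_map, List.mem_filter, List.mem_range, decide_eq_true_eq]
  constructor
  · rintro ⟨v, ⟨i, ⟨hi, hlt⟩, rfl⟩, ht⟩
    exact ⟨i, hi, hlt, ht⟩
  · rintro ⟨i, hi, hlt, ht⟩
    exact ⟨pvAt perm i, ⟨i, ⟨hi, hlt⟩, rfl⟩, ht⟩

theorem pvB2_gt (perm : List Int) (x : Nat) (hx : x < perm.length) (t : Int) :
    (∃ b, (pvB2 perm).getD x none = some b ∧ t < b) ↔
      ∃ i j, i < j ∧ j < x ∧ pvAt perm i < pvAt perm j ∧ t < pvAt perm i := by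
  have hlenP : (pvP perm).length = perm.length := by simp [pvP]
  rw [pvB2, PySem.List.getD_map_range _ _ _ _ hx, pvMx_gt]
  constructor
  · rintro ⟨v, hv, ht⟩
    rw [List.mem_filterMap] at hv
    obtain ⟨o, ho, hid⟩ := hv
    cases o with
    | none => cases hid
    | some w =>
      cases hid
      rw [List.mem_take_iff_getElem] at ho
      obtain ⟨jj, hjj, hP⟩ := ho
      have hjlen : jj < perm.length := by rw [hlenP] at hjj; omega
      have hPj : (pvP perm).getD jj none = some v := by
        rw [List.getD_eq_getElem _ _ (by omega)]
        exact hP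
      obtain ⟨i, hi, hlt, hti⟩ := (pvP_gt perm jj hjlen t).1 ⟨v, hPj, ht⟩
      exact ⟨i, jj, hi, by rw [hlenP] at hjj; omega, hlt, hti⟩
  · rintro ⟨i, j, hij, hjx, hlt, ht⟩
    have hjlen : j < perm.length := by omega
    obtain ⟨b, hb, htb⟩ := (pvP_gt perm j hjlen t).2 ⟨i, hij, hlt, ht⟩
    refine ⟨b, ?_, htb⟩
    rw [List.mem_filterMap]
    refine ⟨some b, ?_, rfl⟩
    rw [List.mem_take_iff_getElem]
    refine ⟨j, by omega, ?_⟩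
    rw [List.getD_eq_getElem _ _ (by omega)] at hb
    exact hb

theorem pvPref_gt (perm : List Int) (x : Nat) (hx : x < perm.length) (t : Int) :
    (∃ b, (pvPref perm).getD x none = some b ∧ t < b) ↔
      ∃ i, i < x ∧ t < pvAt perm i := by
  rw [pvPref, PySem.List.getD_map_range _ _ _ _ hx, pvMx_gt]
  constructor
  · rintro ⟨v, hv, ht⟩
    obtain ⟨i, h1, h2, rfl⟩ := (mem_take_iff perm x v).1 hv
    exact ⟨i, h1, ht⟩
  · rintro ⟨i, h1, ht⟩
    exact ⟨pvAt perm i, (mem_take_iff perm x _).2 ⟨i, h1, by omega, rfl⟩, ht⟩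

theorem pvSuf_lt (perm : List Int) (y : Nat) (hy : y < perm.length) (t : Int) :
    (∃ m, (pvSuf perm).getD y none = some m ∧ m < t) ↔
      ∃ l, y < l ∧ l < perm.length ∧ pvAt perm l < t := by
  rw [pvSuf, PySem.List.getD_map_range _ _ _ _ hy, pvMn_lt]
  constructor
  · rintro ⟨v, hv, ht⟩
    obtain ⟨l, h1, h2, rfl⟩ := (mem_drop_iff perm y v).1 hv
    exact ⟨l, h1, h2, ht⟩
  · rintro ⟨l, h1, h2, ht⟩
    exact ⟨pvAt perm l, (mem_drop_iff perm y _).2 ⟨l, h1, h2, rfl⟩, ht⟩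

theorem ifsmooth_alt_true_iff (perm : List Int) : ifsmooth_alt perm = true ↔ ¬ pvBad perm := by
  rw [ifsmooth_alt]
  rw [Bool.not_eq_true', ← Bool.not_eq_true]
  have hbig : ((List.range perm.length).any fun x =>
      ((List.range perm.length).filter (fun y => decide (x < y))).any fun y =>
        (decide (pvAt perm x < pvAt perm y) &&
          (((pvB2 perm).getD x none).any fun b => decide (b > pvAt perm y)))
        ||
        (decide (pvAt perm x < pvAt perm y) &&
          (((pvPref perm).getD x none).any fun b => decide (b > pvAt perm y)) &&
          (((pvSuf perm).getD y none).any fun m => decide (m < pvAt perm x)))) = true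
      ↔ pvBad perm := by
    simp only [List.any_eq_true, List.mem_filter, List.mem_range, Bool.or_eq_true,
      Bool.and_eq_true, decide_eq_true_eq, optAnyGt_iff, optAnyLt_iff]
    constructor
    · rintro ⟨x, hx, y, ⟨hy, hxy⟩, hcond⟩
      rcases hcond with ⟨hvxy, hb2⟩ | ⟨⟨hvxy, hpref⟩, hsuf⟩
      · obtain ⟨i, j, hij, hjx, hlt, ht⟩ := (pvB2_gt perm x hx _).1 hb2
        exact ⟨i, j, x, y, hij, hjx, hxy, hy, Or.inl ⟨hlt, ht, hvxy⟩⟩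
      · obtain ⟨i, hi, hti⟩ := (pvPref_gt perm x hx _).1 hpref
        obtain ⟨l, hyl, hl, htl⟩ := (pvSuf_lt perm y hy _).1 hsuf
        exact ⟨i, x, y, l, hi, hxy, hyl, hl, Or.inr ⟨hti, hvxy, htl⟩⟩
    · rintro ⟨i, j, k, l, hij, hjk, hkl, hl, hpat⟩
      rcases hpat with ⟨h1, h2, h3⟩ | ⟨h1, h2, h3⟩
      · -- 3412: pair (x, y) = (k, l), witnesses i < j < k
        refine ⟨k, by omega, l, ⟨hl, hkl⟩, Or.inl ⟨h3, ?_⟩⟩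
        exact (pvB2_gt perm k (by omega) _).2 ⟨i, j, hij, hjk, h1, h2⟩
      · -- 4231: pair (x, y) = (j, k), witnesses i and l
        refine ⟨j, by omega, k, ⟨by omega, hjk⟩, Or.inr ⟨⟨h2, ?_⟩, ?_⟩⟩
        · exact (pvPref_gt perm j (by omega) _).2 ⟨i, hij, h1⟩
        · exact (pvSuf_lt perm k (by omega) _).2 ⟨l, hkl, hl, h3⟩
  rw [hbig]

-- ===== VERDICT (by name: the statement is the Claim_ definition above) =====
theorem ifsmooth_spec : Claim_equal_ifsmooth := by
  intro perm _
  unfold Spec_ifsmooth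
  rw [Bool.eq_iff_iff, ifsmooth_true_iff, ifsmooth_alt_true_iff]
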